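-- pv_equiv track=rewrite | github.com/anishfelixm/100daysofCP | python/55b_1490A_DenseArray.py | solve
-- ===== SOURCE A (Python) =====
-- def count(a, b):
--     ret = 0
--     while 2 * a < b:
--         ret += 1
--         a *= 2
--     return ret
--
-- def solve(arr, n):
--     cnt = 0
--     arr[0] = int(arr[0])
--     for i in range(1, n):
--         arr[i] = int(arr[i])
--         if 2 * min(arr[i], arr[i-1]) < max(arr[i], arr[i-1]):
--             cnt += count(min(arr[i], arr[i-1]), max(arr[i], arr[i-1]))
--     return cnt
-- ===== SOURCE B (Python) =====
-- def solve(arr, n):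
--     cnt = 0
--     arr[0] = int(arr[0])
--     for i in range(1, n):
--         arr[i] = int(arr[i])
--         lo = min(arr[i], arr[i - 1])
--         hi = max(arr[i], arr[i - 1])
--         if 2 * lo < hi:
--             q = (hi + lo - 1) // lo          # ceil(hi / lo); lo > 0 whenever this branch runs on valid input
--             cnt += (q - 1).bit_length() - 1  # smallest t with lo * 2**t >= hi, minus 1
--     return cnt
-- ===== Notes on version B (the rewrite author's own statement) =====
-- stated objective: faster
-- what changed: The inner while-loop that repeatedly doubles the smaller element is replaced by a closed-form computation: q = ceil(hi/lo) via integer division, and the doubling count is (q-1).bit_length() - 1.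
import Mathlib
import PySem

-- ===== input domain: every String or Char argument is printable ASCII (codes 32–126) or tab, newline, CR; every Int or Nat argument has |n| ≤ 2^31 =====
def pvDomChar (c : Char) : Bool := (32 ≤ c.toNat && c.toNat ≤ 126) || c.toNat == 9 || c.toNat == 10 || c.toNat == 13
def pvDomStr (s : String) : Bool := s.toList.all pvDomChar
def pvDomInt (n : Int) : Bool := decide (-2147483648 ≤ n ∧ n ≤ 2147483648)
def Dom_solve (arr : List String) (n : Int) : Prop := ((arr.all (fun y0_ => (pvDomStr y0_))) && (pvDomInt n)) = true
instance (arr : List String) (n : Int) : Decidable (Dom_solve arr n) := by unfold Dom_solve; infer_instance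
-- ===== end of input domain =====

-- B replaces A's inner doubling while-loop by a closed-form ceil-division + bit_length computation.
-- A mutates arr in place (int() conversions); the equivalence proved here is about the RETURN value only.

-- ===== PORT A =====
-- count(a, b): the doubling while-loop.  The 'a ≤ 0' branch returns a junk value where
-- Python's loop diverges (such inputs are excluded by Pre_solve); it only makes the
-- recursion total, the computation on admitted inputs is Python's.
def count (a b : Int) : Int :=
  if _h : 2 * a < b then
    if _h0 : a ≤ 0 then 0
    else 1 + count (2 * a) b
  else 0
termination_by (b - a).toNat
decreasing_by simp only [not_le] at _h0; omega

-- arr[i] as an Int: index then int(); junk 0 where Python raises (excluded by Pre_solve)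
def pvVal (arr : List String) (i : Int) : Int :=
  ((PySem.List.pyGet? arr i).bind PySem.Int.ofStr?).getD 0

def solve (arr : List String) (n : Int) : Int :=
  let a0 := pvVal arr 0
  ((PySem.List.pyRange 1 n 1).foldl (fun (st : Int × Int) i =>
      let v := pvVal arr i
      if 2 * min v st.2 < max v st.2 then
        (st.1 + count (min v st.2) (max v st.2), v)
      else (st.1, v)) ((0 : Int), a0)).1

-- ===== PORT B =====
def solve_alt (arr : List String) (n : Int) : Int :=
  let a0 := pvVal arr 0
  ((PySem.List.pyRange 1 n 1).foldl (fun (st : Int × Int) i =>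
      let v := pvVal arr i
      let lo := min v st.2
      let hi := max v st.2
      if 2 * lo < hi then
        let q := PySem.Int.floordiv (hi + lo - 1) lo
        (st.1 + ((PySem.Int.bitLength (q - 1) : Int) - 1), v)
      else (st.1, v)) ((0 : Int), a0)).1

-- ===== PRECONDITION & SPEC =====
-- Pre_solve excludes exactly the inputs on which A does not return a value: IndexError
-- (empty arr, or n > len(arr)), ValueError (a touched entry not parseable by int()), and
-- adjacent pairs with min ≤ 0 under the 2*min < max guard, on which A's count loop
-- diverges (and B raises ZeroDivisionError when min = 0).
def Pre_solve (arr : List String) (n : Int) : Prop :=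
  arr ≠ [] ∧ n ≤ (arr.length : Int) ∧
  (∀ i < (max 1 n).toNat, (PySem.Int.ofStr? (arr.getD i "")).isSome = true) ∧
  (∀ i < (max 1 n).toNat, 0 < i →
     2 * min ((PySem.Int.ofStr? (arr.getD (i-1) "")).getD 0) ((PySem.Int.ofStr? (arr.getD i "")).getD 0)
       < max ((PySem.Int.ofStr? (arr.getD (i-1) "")).getD 0) ((PySem.Int.ofStr? (arr.getD i "")).getD 0)
     → 0 < min ((PySem.Int.ofStr? (arr.getD (i-1) "")).getD 0) ((PySem.Int.ofStr? (arr.getD i "")).getD 0))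
instance (arr : List String) (n : Int) : Decidable (Pre_solve arr n) := by unfold Pre_solve; infer_instance

def pvWitness_solve : List String × Int := (["1", "9", "2"], 3)

def Spec_solve (arr : List String) (n : Int) (out : Int) : Prop := out = solve_alt arr n
instance (arr : List String) (n : Int) (out : Int) : Decidable (Spec_solve arr n out) := by unfold Spec_solve; infer_instance

-- ===== CLAIM (what is proved, stated in full; the proofs are below) =====
def Claim_equal_solve : Prop := ∀ (arr : List String) (n : Int), Dom_solve arr n → Pre_solve arr n → Spec_solve arr n (solve arr n)

-- ===== LEMMAS AND PROOFS =====

theorem pvVal_eq (arr : List String) (k : Int) (h0 : 0 ≤ k) (h1 : k < (arr.length : Int)) :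
    pvVal arr k = (PySem.Int.ofStr? (arr.getD k.toNat "")).getD 0 := by
  unfold pvVal
  rw [PySem.List.pyGet?_of_nonneg (xs := arr) h0]
  have hk : k.toNat < arr.length := by omega
  simp [List.getElem?_eq_getElem hk, List.getD_eq_getElem?_getD]

-- closed form for count: with q = ceil(hi/lo), count lo hi = bit_length(q-1) - 1
theorem count_closed_aux : ∀ (m : Nat) (lo hi : Int), 0 < lo → 2 * lo < hi → (hi - 2 * lo).toNat ≤ m →
    count lo hi = ((PySem.Int.bitLength (PySem.Int.floordiv (hi + lo - 1) lo - 1) : Int) - 1) := by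
  intro m
  induction m with
  | zero => intro lo hi hlo h hm; omega
  | succ m ih =>
    intro lo hi hlo h hm
    set q := PySem.Int.floordiv (hi + lo - 1) lo with hqdef
    have hq := (PySem.Int.floordiv_eq_iff_of_pos hlo).mp hqdef.symm
    have hq3 : 3 ≤ q := by nlinarith [hq.1, hq.2]
    rw [count]
    rw [dif_pos h, dif_neg (by omega : ¬ lo ≤ 0)]
    by_cases h4 : 2 * (2 * lo) < hi
    · rw [ih (2 * lo) hi (by omega) h4 (by omega)]
      set q2 := PySem.Int.floordiv (hi + 2 * lo - 1) (2 * lo) with hq2def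
      have hq2 := (PySem.Int.floordiv_eq_iff_of_pos (by omega : (0:Int) < 2 * lo)).mp hq2def.symm
      have h5 : 5 ≤ q := by nlinarith [hq.1, hq.2]
      have hle : q ≤ 2 * q2 := by nlinarith [hq.1, hq.2, hq2.1, hq2.2]
      have hge : 2 * q2 ≤ q + 1 := by nlinarith [hq.1, hq.2, hq2.1, hq2.2]
      have hbl := PySem.Int.bitLength_of_pos (n := q - 1) (by omega)
      have hfd : PySem.Int.floordiv (q - 1) 2 = q2 - 1 := by
        rw [PySem.Int.floordiv_eq_ediv_of_pos (by omega)]; omega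
      rw [hfd] at hbl
      rw [hbl]; push_cast; ring
    · rw [count, dif_neg h4]
      have hq4 : q ≤ 4 := by nlinarith [hq.1, hq.2]
      have : q = 3 ∨ q = 4 := by omega
      rcases this with h3 | h3 <;> rw [h3] <;> decide

theorem count_closed (lo hi : Int) (hlo : 0 < lo) (h : 2 * lo < hi) :
    count lo hi = ((PySem.Int.bitLength (PySem.Int.floordiv (hi + lo - 1) lo - 1) : Int) - 1) :=
  count_closed_aux (hi - 2 * lo).toNat lo hi hlo h le_rfl

-- the two folds agree step by step: the invariant is that the carried snd component is
-- the parsed value at index k-1, so the pair condition of Pre_solve applies at each step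
theorem fold_eq (arr : List String) (n : Int) (hn : n ≤ (arr.length : Int))
    (hpair : ∀ i < (max 1 n).toNat, 0 < i →
       2 * min ((PySem.Int.ofStr? (arr.getD (i-1) "")).getD 0) ((PySem.Int.ofStr? (arr.getD i "")).getD 0)
         < max ((PySem.Int.ofStr? (arr.getD (i-1) "")).getD 0) ((PySem.Int.ofStr? (arr.getD i "")).getD 0)
       → 0 < min ((PySem.Int.ofStr? (arr.getD (i-1) "")).getD 0) ((PySem.Int.ofStr? (arr.getD i "")).getD 0)) :
    ∀ (m : Nat) (k c : Int), 1 ≤ k → (n - k).toNat ≤ m →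
    (PySem.List.pyRange k n 1).foldl (fun (st : Int × Int) i =>
      let v := pvVal arr i
      if 2 * min v st.2 < max v st.2 then
        (st.1 + count (min v st.2) (max v st.2), v)
      else (st.1, v)) (c, pvVal arr (k - 1)) =
    (PySem.List.pyRange k n 1).foldl (fun (st : Int × Int) i =>
      let v := pvVal arr i
      let lo := min v st.2
      let hi := max v st.2
      if 2 * lo < hi then
        let q := PySem.Int.floordiv (hi + lo - 1) lo
        (st.1 + ((PySem.Int.bitLength (q - 1) : Int) - 1), v)
      else (st.1, v)) (c, pvVal arr (k - 1)) := by
  intro m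
  induction m with
  | zero =>
    intro k c hk hm
    rw [PySem.List.pyRange_one_eq_nil (by omega)]
    rfl
  | succ m ih =>
    intro k c hk hm
    by_cases hkn : k < n
    · rw [PySem.List.pyRange_one_cons hkn]
      simp only [List.foldl_cons]
      have hkl : k < (arr.length : Int) := lt_of_lt_of_le hkn hn
      have hkv : pvVal arr k = (PySem.Int.ofStr? (arr.getD k.toNat "")).getD 0 :=
        pvVal_eq arr k (by omega) (by omega)
      have hk1v : pvVal arr (k - 1) = (PySem.Int.ofStr? (arr.getD (k.toNat - 1) "")).getD 0 := by
        rw [pvVal_eq arr (k - 1) (by omega) (by omega)]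
        have h' : (k - 1).toNat = k.toNat - 1 := by omega
        rw [h']
      have hp := hpair k.toNat (by omega) (by omega)
      rw [← hk1v, ← hkv] at hp
      rw [min_comm, max_comm] at hp
      set v := pvVal arr k with hv
      set prev := pvVal arr (k - 1) with hprev
      by_cases hg : 2 * min v prev < max v prev
      · have hlo : 0 < min v prev := hp hg
        have hcc := count_closed (min v prev) (max v prev) hlo hg
        have hstep : ∀ c' : Int,
            (PySem.List.pyRange (k + 1) n 1).foldl (fun (st : Int × Int) i =>
              let v := pvVal arr i
              if 2 * min v st.2 < max v st.2 then
                (st.1 + count (min v st.2) (max v st.2), v)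
              else (st.1, v)) (c', pvVal arr ((k + 1) - 1)) =
            (PySem.List.pyRange (k + 1) n 1).foldl (fun (st : Int × Int) i =>
              let v := pvVal arr i
              let lo := min v st.2
              let hi := max v st.2
              if 2 * lo < hi then
                let q := PySem.Int.floordiv (hi + lo - 1) lo
                (st.1 + ((PySem.Int.bitLength (q - 1) : Int) - 1), v)
              else (st.1, v)) (c', pvVal arr ((k + 1) - 1)) := by
          intro c'; exact ih (k + 1) c' (by omega) (by omega)
        simp only [add_sub_cancel_right, ← hv] at hstep
        show (PySem.List.pyRange (k+1) n 1).foldl _ (if 2 * min v prev < max v prev then (c + count (min v prev) (max v prev), v) else (c, v)) = _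
        rw [if_pos hg, if_pos hg, hcc]
        exact hstep _
      · have hstep := ih (k + 1) c (by omega) (by omega)
        simp only [add_sub_cancel_right, ← hv] at hstep
        show (PySem.List.pyRange (k+1) n 1).foldl _ (if 2 * min v prev < max v prev then (c + count (min v prev) (max v prev), v) else (c, v)) = _
        rw [if_neg hg, if_neg hg]
        exact hstep
    · rw [PySem.List.pyRange_one_eq_nil (by omega)]
      rfl

-- ===== VERDICT (by name: the statement is the Claim_ definition above) =====
theorem solve_spec : Claim_equal_solve := by
  intro arr n _hdom hpre
  obtain ⟨_hne, hn, _hparse, hpair⟩ := hpre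
  show solve arr n = solve_alt arr n
  have h := fold_eq arr n hn hpair (n - 1).toNat 1 0 le_rfl le_rfl
  have h0 : (1 : Int) - 1 = 0 := by norm_num
  rw [h0] at h
  simp only [solve, solve_alt]
  rw [h]
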